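-- pv_equiv track=rewrite | github.com/pietro202020/cryptography | krypt_1.py | long_run_test
-- ===== SOURCE A (Python) =====
-- def long_run_test(sequence):
--     """
--     Test długiej serii: sprawdza, czy w sekwencji nie występuje
--     zbyt długa seria powtarzających się bitów.
--     """
--     max_run = 0
--     current_run = 1
--     for i in range(1, len(sequence)):
--         if sequence[i] == sequence[i - 1]:  # Jeśli to ten sam bit co poprzedni
--             current_run += 1
--         else:
--             max_run = max(max_run, current_run)  # Zapisujemy największą dotychczasową serię
--             current_run = 1
--     max_run = max(max_run, current_run)  # Ostateczna największa seria
--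
--     return max_run < 26  # Maksymalna długość serii < 26
-- ===== SOURCE B (Python) =====
-- def long_run_test(sequence):
--     # A 26-bit constant window exists iff some run of equal bits has length >= 26.
--     for i in range(len(sequence) - 25):
--         if sequence[i:i + 26] == [sequence[i]] * 26:
--             return False
--     return True
-- ===== Notes on version B (the rewrite author's own statement) =====
-- stated objective: alternative
-- what changed: Replaced A's single-pass run-counting state machine (max_run/current_run) with a sliding-window test: for every start index, compare the length-26 slice against a constant list; a run of >= 26 equal bits exists iff some 26-window is constant.
import Mathlib
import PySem

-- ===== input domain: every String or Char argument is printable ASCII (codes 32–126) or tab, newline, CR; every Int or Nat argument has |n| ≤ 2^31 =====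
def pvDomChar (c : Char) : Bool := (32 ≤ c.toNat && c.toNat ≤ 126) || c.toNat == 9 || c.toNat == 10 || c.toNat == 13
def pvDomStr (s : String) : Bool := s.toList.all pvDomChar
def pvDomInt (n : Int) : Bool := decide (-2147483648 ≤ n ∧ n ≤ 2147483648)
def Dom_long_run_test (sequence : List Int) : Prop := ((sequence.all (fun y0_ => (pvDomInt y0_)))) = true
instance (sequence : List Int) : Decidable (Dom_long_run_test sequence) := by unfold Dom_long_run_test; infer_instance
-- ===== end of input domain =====

-- B replaces A's single-pass max_run/current_run state machine with a sliding-window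
-- scan: a run of >= 26 equal bits exists iff some length-26 window is constant (alternative, same asymptotic cost).

-- ===== PORT A =====
-- A's loop body: one iteration of 'for i in range(1, len(sequence))' on state (max_run, current_run)
def pyStep (seq : List Int) (st : Int × Int) (i : Int) : Int × Int :=
  if PySem.List.pyGet? seq i == PySem.List.pyGet? seq (i - 1) then
    (st.1, st.2 + 1)
  else
    (max st.1 st.2, 1)

def long_run_test (sequence : List Int) : Bool :=
  let st := (PySem.List.pyRange 1 (sequence.length : Int) 1).foldl (pyStep sequence) (0, 1)
  decide (max st.1 st.2 < 26)

-- ===== PORT B =====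
-- 'sequence[i:i+26] == [sequence[i]] * 26' for one window start i (i is always in range in B)
def winConst (seq : List Int) (i : Int) : Bool :=
  match PySem.List.pyGet? seq i with
  | some v => PySem.List.slice seq (some i) (some (i + 26)) == List.replicate 26 v
  | none => false

-- 'for i in range(len(sequence) - 25): if <window constant>: return False / return True'
def long_run_test_alt (sequence : List Int) : Bool :=
  (PySem.List.pyRange 0 ((sequence.length : Int) - 25) 1).all (fun i => !winConst sequence i)

-- ===== PRECONDITION & SPEC =====
def Spec_long_run_test (sequence : List Int) (out : Bool) : Prop := out = long_run_test_alt sequence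
instance (sequence : List Int) (out : Bool) : Decidable (Spec_long_run_test sequence out) := by unfold Spec_long_run_test; infer_instance

-- ===== CLAIM (what is proved, stated in full; the proofs are below) =====
def Claim_equal_long_run_test : Prop := ∀ (sequence : List Int), Dom_long_run_test sequence → Spec_long_run_test sequence (long_run_test sequence)

-- ===== LEMMAS AND PROOFS =====

-- A's loop, rephrased as structural recursion on the suffix still to be scanned
def stepA (prev m c : Int) : List Int → Int
  | [] => max m c
  | y :: ys => if y = prev then stepA y m (c + 1) ys else stepA y (max m c) 1 ys

-- A's index fold over pre ++ prev :: suf, starting at index pre.length + 1, equals stepA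
theorem foldA_eq (suf : List Int) : ∀ (pre : List Int) (prev m c : Int),
    (let st := (PySem.List.pyRange ((pre.length : Int) + 1)
        (((pre ++ prev :: suf).length : Nat) : Int) 1).foldl
        (pyStep (pre ++ prev :: suf)) (m, c)
     max st.1 st.2) = stepA prev m c suf := by
  induction suf with
  | nil =>
    intro pre prev m c
    have hle : (((pre ++ [prev]).length : Nat) : Int) ≤ (pre.length : Int) + 1 := by simp
    simp only [PySem.List.pyRange_one_eq_nil hle, List.foldl_nil, stepA]
  | cons y ys ih =>
    intro pre prev m c
    have hlt : (pre.length : Int) + 1 < (((pre ++ prev :: y :: ys).length : Nat) : Int) := by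
      simp
    have h1 : PySem.List.pyGet? (pre ++ prev :: y :: ys) ((pre.length : Int) + 1) = some y := by
      have e : ((pre.length : Int) + 1) = (((pre.length + 1 : Nat)) : Int) := by push_cast; ring
      rw [e, PySem.List.pyGet?_natCast]; simp
    have H := ih (pre ++ [prev]) y
    have e2 : (((pre ++ [prev]).length : Nat) : Int) = (pre.length : Int) + 1 := by simp
    have e3 : (pre ++ [prev]) ++ y :: ys = pre ++ prev :: y :: ys := by simp
    rw [e2, e3] at H
    simp only [PySem.List.pyRange_one_cons hlt, List.foldl_cons]
    rw [show pyStep (pre ++ prev :: y :: ys) (m, c) ((pre.length : Int) + 1)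
        = if y = prev then (m, c + 1) else (max m c, 1) by
      simp [pyStep, h1]]
    by_cases hy : y = prev
    · simp only [stepA, if_pos hy]
      exact H m (c + 1)
    · simp only [stepA, if_neg hy]
      exact H (max m c) 1

-- the '< 26' test threaded through A's state machine
def chk (prev c : Int) : List Int → Bool
  | [] => decide (c < 26)
  | y :: ys => if y = prev then chk y (c + 1) ys else decide (c < 26) && chk y 1 ys

theorem stepA_lt (ys : List Int) : ∀ (prev m c : Int),
    (stepA prev m c ys < 26) ↔ (m < 26 ∧ chk prev c ys = true) := by
  induction ys with
  | nil => intro prev m c; simp [stepA, chk]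
  | cons y ys ih =>
    intro prev m c
    by_cases hy : y = prev
    · simp only [stepA, chk, if_pos hy]; exact ih y m (c + 1)
    · simp only [stepA, chk, if_neg hy]
      rw [ih y (max m c) 1]
      cases h : chk y 1 ys <;> simp

-- B's window scan, rephrased as structural recursion
def altRec : List Int → Bool
  | [] => true
  | x :: xs => (xs.take 25 != List.replicate 25 x) && altRec xs

theorem altRec_cons (x : Int) (xs : List Int) :
    altRec (x :: xs) = ((xs.take 25 != List.replicate 25 x) && altRec xs) := rfl

theorem altRec_short (l : List Int) (h : l.length ≤ 25) : altRec l = true := by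
  induction l with
  | nil => rfl
  | cons x xs ih =>
    have hx : xs.take 25 ≠ List.replicate 25 x := by
      intro he
      have hl := congrArg List.length he
      simp at hl
      simp at h; omega
    rw [altRec_cons, ih (by simp at h ⊢; omega), Bool.and_true]
    simp only [bne_iff_ne, ne_eq]
    exact hx

-- B's index fold over pre ++ suf, starting at index pre.length, equals altRec suf
theorem foldB_eq (suf : List Int) : ∀ (pre : List Int),
    (PySem.List.pyRange ((pre.length : Int)) ((((pre ++ suf).length : Nat) : Int) - 25) 1).all
      (fun i => !winConst (pre ++ suf) i) = altRec suf := by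
  induction suf with
  | nil =>
    intro pre
    rw [PySem.List.pyRange_one_eq_nil (by simp)]
    rfl
  | cons x xs ih =>
    intro pre
    by_cases hlen : xs.length ≤ 24
    · rw [PySem.List.pyRange_one_eq_nil (by simp; omega)]
      exact (altRec_short (x :: xs) (by simp; omega)).symm
    · have hlt : (pre.length : Int) < (((pre ++ x :: xs).length : Nat) : Int) - 25 := by
        simp; omega
      rw [PySem.List.pyRange_one_cons hlt, List.all_cons]
      have hget : PySem.List.pyGet? (pre ++ x :: xs) (pre.length : Int) = some x :=
        PySem.List.pyGet?_append_length pre xs x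
      have hslice : PySem.List.slice (pre ++ x :: xs) (some (pre.length : Int))
          (some ((pre.length : Int) + 26)) = x :: xs.take 25 := by
        rw [show ((pre.length : Int) + 26) = ((pre.length + 26 : Nat) : Int) by push_cast; ring,
          PySem.List.slice_natCast]
        simp
      have hwin : winConst (pre ++ x :: xs) (pre.length : Int)
          = (xs.take 25 == List.replicate 25 x) := by
        simp only [winConst, hget, hslice]
        have h26 : List.replicate 26 x = x :: List.replicate 25 x := rfl
        rw [h26]
        simp
      have H := ih (pre ++ [x])
      have e2 : (((pre ++ [x]).length : Nat) : Int) = (pre.length : Int) + 1 := by simp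
      have e3 : (pre ++ [x]) ++ xs = pre ++ x :: xs := by simp
      rw [e2, e3] at H
      rw [altRec_cons, hwin, ← H]
      rfl

-- runs of length >= 26 inside a pure run: altRec on replicate
theorem altRec_replicate (x : Int) : ∀ (k : Nat), altRec (List.replicate k x) = decide (k < 26) := by
  intro k
  induction k with
  | zero => rfl
  | succ k ih =>
    rw [List.replicate_succ, altRec_cons, ih]
    by_cases hk : 25 ≤ k
    · rw [List.take_replicate, show min 25 k = 25 by omega]
      simp only [bne_self_eq_false, Bool.false_and]
      rw [eq_comm, decide_eq_false_iff_not]; omega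
    · rw [List.take_replicate, show min 25 k = k by omega]
      have hne : List.replicate k x ≠ List.replicate 25 x := by
        intro he; have hl := congrArg List.length he; simp at hl; omega
      rw [show (List.replicate k x != List.replicate 25 x) = true from bne_iff_ne.mpr hne,
        Bool.true_and, decide_eq_true (show k < 26 by omega),
        decide_eq_true (show k + 1 < 26 by omega)]

-- skipping a leading run of k copies of x in front of a different bit y
theorem altRec_run (x y : Int) (l : List Int) (hxy : y ≠ x) :
    ∀ (k : Nat), altRec (List.replicate k x ++ y :: l) = ((decide (k < 26)) && altRec (y :: l)) := by
  intro k
  induction k with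
  | zero =>
    rw [List.replicate_zero, List.nil_append, decide_eq_true (by omega : (0:Nat) < 26),
      Bool.true_and]
  | succ k ih =>
    rw [List.replicate_succ, List.cons_append, altRec_cons, ih]
    by_cases hk : 25 ≤ k
    · rw [List.take_append_of_le_length (by simp; omega), List.take_replicate,
        show min 25 k = 25 by omega, decide_eq_false (show ¬ (k + 1 < 26) by omega)]
      simp
    · have hne : (List.replicate k x ++ y :: l).take 25 ≠ List.replicate 25 x := by
        intro he
        have hmem : y ∈ (List.replicate k x ++ y :: l).take 25 := by
          rw [List.take_append, List.take_replicate, show min 25 k = k by omega,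
            List.length_replicate]
          exact List.mem_append_right _ (by
            rw [List.take_cons (by omega)]
            exact List.mem_cons_self ..)
        rw [he] at hmem
        exact hxy (List.eq_of_mem_replicate hmem)
      rw [show ((List.replicate k x ++ y :: l).take 25 != List.replicate 25 x) = true
          from bne_iff_ne.mpr hne,
        Bool.true_and, decide_eq_true (show k < 26 by omega),
        decide_eq_true (show k + 1 < 26 by omega)]

-- the core equivalence: A's threshold machine = B's window recursion, on a run of k+1 known copies
theorem chk_eq_altRec (xs : List Int) : ∀ (x : Int) (k : Nat),
    chk x ((k : Int) + 1) xs = altRec (List.replicate k x ++ x :: xs) := by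
  induction xs with
  | nil =>
    intro x k
    rw [show List.replicate k x ++ [x] = List.replicate (k + 1) x by
        rw [← List.replicate_succ']
      , altRec_replicate]
    simp [chk]; omega
  | cons y ys ih =>
    intro x k
    by_cases hy : y = x
    · subst hy
      have e : List.replicate k y ++ y :: y :: ys = List.replicate (k + 1) y ++ y :: ys := by
        simp [List.replicate_succ']
      rw [show chk y ((k : Int) + 1) (y :: ys) = chk y ((k : Int) + 1 + 1) ys from if_pos rfl, e,
        show ((k : Int) + 1 + 1) = ((k + 1 : Nat) : Int) + 1 by push_cast; ring]
      exact ih y (k + 1)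
    · have e : List.replicate k x ++ x :: y :: ys = List.replicate (k + 1) x ++ y :: ys := by
        simp [List.replicate_succ']
      rw [show chk x ((k : Int) + 1) (y :: ys)
          = (decide (((k : Int) + 1) < 26) && chk y 1 ys) from if_neg hy, e,
        altRec_run x y ys hy (k + 1),
        show chk y (1 : Int) ys = chk y (((0 : Nat) : Int) + 1) ys by norm_num,
        ih y 0,
        show (decide ((k : Int) + 1 < 26)) = (decide ((k + 1 : Nat) < 26)) by
          rw [decide_eq_decide]; omega]
      simp

-- ===== VERDICT (by name: the statement is the Claim_ definition above) =====
theorem long_run_test_spec : Claim_equal_long_run_test := by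
  intro sequence _
  unfold Spec_long_run_test
  cases sequence with
  | nil => decide
  | cons x xs =>
    have hA := foldA_eq xs [] x 0 1
    norm_num at hA
    have hB := foldB_eq (x :: xs) []
    norm_num at hB
    have hchk := chk_eq_altRec xs x 0
    norm_num at hchk
    rw [long_run_test_alt]
    simp only [List.length_cons, Nat.cast_add, Nat.cast_one]
    rw [hB, ← hchk]
    simp only [long_run_test, List.length_cons, Nat.cast_add, Nat.cast_one]
    rw [show (decide (max ((PySem.List.pyRange 1 ((xs.length : Int) + 1) 1).foldl
        (pyStep (x :: xs)) (0, 1)).1 ((PySem.List.pyRange 1 ((xs.length : Int) + 1) 1).foldl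
        (pyStep (x :: xs)) (0, 1)).2 < 26))
      = decide (stepA x 0 1 xs < 26) by rw [← hA]]
    cases h : chk x 1 xs with
    | false =>
      apply decide_eq_false
      intro hlt
      have hc := ((stepA_lt xs x 0 1).mp hlt).2
      rw [h] at hc
      exact Bool.false_ne_true hc
    | true => exact decide_eq_true ((stepA_lt xs x 0 1).mpr ⟨by omega, h⟩)
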